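-- pv_equiv track=rewrite | github.com/ra5ika27/Algorithmic-Problem-Solving | clique.py | min_clique
-- ===== SOURCE A (Python) =====
-- def min_clique(N, M):
--     low, high = 1, N
--     while low + 1 < high:
--         mid = (low + high) // 2
--         d, r = divmod(N, mid)
--         m_max = (N * N - (d + 1) * (d + 1) * r - d * d * (mid - r)) // 2
--         if m_max < M:
--             low = mid
--         else:
--             high = mid
--     return high
-- ===== SOURCE B (Python) =====
-- def min_clique(N, M):
--     # Divisor-block search: d = N // k is piecewise constant; inside a block the
--     # clique-partition edge bound is linear in k, so each block is solved in O(1)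
--     # by a ceiling division instead of probing individual k values.
--     if N <= 2:
--         return N
--     k = 2
--     while k < N:
--         d = N // k
--         k2 = min(N // d, N - 1)
--         # for k <= j <= k2:  m_max(j) >= M  <=>  d*(d+1)*j >= c
--         c = (2 * d + 1) * N - N * N + 2 * M
--         if d * (d + 1) * k2 >= c:
--             return max(k, -(-c // (d * (d + 1))))
--         k = k2 + 1
--     return N
-- ===== Notes on version B (the rewrite author's own statement) =====
-- stated objective: alternative
-- what changed: Replaces the bisection over mid with a divisor-block scan: d = N//mid is piecewise constant, and within each block the m_max bound is linear in mid, so each block is decided and (when it contains the answer) closed by a single ceiling division instead of probing midpoints.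
import Mathlib
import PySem

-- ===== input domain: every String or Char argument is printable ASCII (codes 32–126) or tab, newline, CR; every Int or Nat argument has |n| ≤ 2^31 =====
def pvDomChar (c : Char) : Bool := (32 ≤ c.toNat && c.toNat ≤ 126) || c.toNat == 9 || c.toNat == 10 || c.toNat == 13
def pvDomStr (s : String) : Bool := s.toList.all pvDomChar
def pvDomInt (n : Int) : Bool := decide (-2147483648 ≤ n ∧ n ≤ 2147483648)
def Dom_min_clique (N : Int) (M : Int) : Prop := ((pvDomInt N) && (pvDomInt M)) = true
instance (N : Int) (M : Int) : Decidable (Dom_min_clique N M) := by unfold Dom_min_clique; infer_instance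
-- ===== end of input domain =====

-- B replaces A's bisection by a divisor-block scan (d = N//k is piecewise constant; each
-- block is closed by one ceiling division), an alternative algorithm of different shape.

-- ===== PORT A =====
-- A's while-loop as recursion on the shrinking bracket (high - low); divmod(N, mid) is
-- PySem floordiv/mod (mid is never 0 on any reachable iteration, so this is exact).
theorem pv_midA (low high : Int) (h : low + 1 < high) :
    (high - PySem.Int.floordiv (low + high) 2).toNat < (high - low).toNat ∧
    (PySem.Int.floordiv (low + high) 2 - low).toNat < (high - low).toNat := by
  have h2 := PySem.Int.floordiv_mul_add_mod (low + high) 2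
  have h3 := PySem.Int.mod_nonneg (low + high) (by omega : (0:Int) < 2)
  have h4 := PySem.Int.mod_lt (low + high) (by omega : (0:Int) < 2)
  omega

def minCliqueLoopA (N M low high : Int) : Int :=
  if low + 1 < high then
    let mid := PySem.Int.floordiv (low + high) 2
    let d := PySem.Int.floordiv N mid
    let r := PySem.Int.mod N mid
    let m_max := PySem.Int.floordiv (N * N - (d + 1) * (d + 1) * r - d * d * (mid - r)) 2
    if m_max < M then minCliqueLoopA N M mid high else minCliqueLoopA N M low mid
  else high
  termination_by (high - low).toNat
  decreasing_by
  · exact (pv_midA low high (by assumption)).1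
  · exact (pv_midA low high (by assumption)).2

def min_clique (N : Int) (M : Int) : Int := minCliqueLoopA N M 1 N

-- ===== PORT B =====
-- helper facts cited by the loop's own hypothesis/termination obligations
theorem pv_le_fdiv_of_mul_le (a b k : Int) (hb : 0 < b) (h : b * k ≤ a) :
    k ≤ PySem.Int.floordiv a b := by
  have h1 := PySem.Int.floordiv_mul_add_mod a b
  have h2 := PySem.Int.mod_nonneg a hb
  have h3 := PySem.Int.mod_lt a hb
  by_contra hc
  rw [not_le] at hc
  nlinarith

theorem pv_fdiv_pos (a b : Int) (hb : 0 < b) (h : b ≤ a) : 1 ≤ PySem.Int.floordiv a b := by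
  have := pv_le_fdiv_of_mul_le a b 1 hb (by omega)
  omega

theorem pv_stepB_le (N k : Int) (hk : 2 ≤ k) (h : k < N) :
    k ≤ min (PySem.Int.floordiv N (PySem.Int.floordiv N k)) (N - 1) := by
  have hd : 1 ≤ PySem.Int.floordiv N k := pv_fdiv_pos N k (by omega) (by omega)
  have hdk : PySem.Int.floordiv N k * k + PySem.Int.mod N k = N :=
    PySem.Int.floordiv_mul_add_mod N k
  have hr := PySem.Int.mod_nonneg N (by omega : (0:Int) < k)
  exact le_min (pv_le_fdiv_of_mul_le N (PySem.Int.floordiv N k) k hd (by nlinarith))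
    (by omega)

theorem pv_stepB_ge (N k : Int) (hk : 2 ≤ k) (h : k < N) :
    2 ≤ min (PySem.Int.floordiv N (PySem.Int.floordiv N k)) (N - 1) + 1 := by
  have := pv_stepB_le N k hk h
  omega

theorem pv_stepB_lt (N k : Int) (hk : 2 ≤ k) (h : k < N) :
    (N - (min (PySem.Int.floordiv N (PySem.Int.floordiv N k)) (N - 1) + 1)).toNat
      < (N - k).toNat := by
  have := pv_stepB_le N k hk h
  omega

-- B's while-loop; k only ever takes values ≥ 2 with N ≥ 3, carried as hypotheses
def minCliqueLoopB (N M k : Int) (hk : 2 ≤ k) (hN : 2 < N) : Int :=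
  if h : k < N then
    let d := PySem.Int.floordiv N k
    let k2 := min (PySem.Int.floordiv N d) (N - 1)
    let c := (2 * d + 1) * N - N * N + 2 * M
    if d * (d + 1) * k2 ≥ c then
      max k (-(PySem.Int.floordiv (-c) (d * (d + 1))))
    else
      minCliqueLoopB N M (k2 + 1) (pv_stepB_ge N k hk h) hN
  else N
  termination_by (N - k).toNat
  decreasing_by
    exact pv_stepB_lt N k hk h

def min_clique_alt (N : Int) (M : Int) : Int :=
  if _h : N ≤ 2 then N
  else minCliqueLoopB N M 2 (le_refl 2) (not_le.mp _h)

-- ===== PRECONDITION & SPEC =====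
def Spec_min_clique (N : Int) (M : Int) (out : Int) : Prop := out = min_clique_alt N M
instance (N : Int) (M : Int) (out : Int) : Decidable (Spec_min_clique N M out) := by unfold Spec_min_clique; infer_instance

-- ===== CLAIM (what is proved, stated in full; the proofs are below) =====
def Claim_equal_min_clique : Prop := ∀ (N : Int) (M : Int), Dom_min_clique N M → Spec_min_clique N M (min_clique N M)

-- ===== LEMMAS AND PROOFS =====

-- the predicate both programs search: "mid cliques admit at least M edges"
def pvP (N M k : Int) : Prop :=
  M ≤ PySem.Int.floordiv
        (N * N - (PySem.Int.floordiv N k + 1) * (PySem.Int.floordiv N k + 1) * PySem.Int.mod N k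
          - PySem.Int.floordiv N k * PySem.Int.floordiv N k * (k - PySem.Int.mod N k)) 2

-- both programs return the unique a with: 2 ≤ a ≤ N, pvP a if a < N, and no t < a satisfies pvP
def pvIsAns (N M a : Int) : Prop :=
  2 ≤ a ∧ a ≤ N ∧ (a < N → pvP N M a) ∧ ∀ t, 2 ≤ t → t < a → ¬ pvP N M t

theorem pvIsAns_unique (N M a b : Int) (ha : pvIsAns N M a) (hb : pvIsAns N M b) : a = b := by
  obtain ⟨ha2, haN, haP, haL⟩ := ha
  obtain ⟨hb2, hbN, hbP, hbL⟩ := hb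
  by_contra hne
  rcases lt_or_gt_of_ne hne with h | h
  · exact hbL a ha2 h (haP (by omega))
  · exact haL b hb2 h (hbP (by omega))

theorem pvP_iff (N M k : Int) (_hk : 0 < k) :
    pvP N M k ↔ (2 * PySem.Int.floordiv N k + 1) * N - N * N + 2 * M
        ≤ PySem.Int.floordiv N k * (PySem.Int.floordiv N k + 1) * k := by
  have hd := PySem.Int.floordiv_mul_add_mod N k
  unfold pvP
  rw [PySem.Int.floordiv_eq_ediv_of_pos (by omega : (0:Int) < 2),
    Int.le_ediv_iff_mul_le (by omega : (0:Int) < 2)]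
  constructor <;> intro h <;> nlinarith [hd]

-- balanced sum of squares is antitone in the part count
theorem pv_sumsq_mono (N t t' d r d' r' : Int) (ht : 1 ≤ t) (htt' : t ≤ t') (htN : t' ≤ N)
    (h1 : d * t + r = N) (hr0 : 0 ≤ r) (hr : r < t)
    (h2 : d' * t' + r' = N) (hr0' : 0 ≤ r') (hr' : r' < t') :
    (2 * d' + 1) * N - d' * (d' + 1) * t' ≤ (2 * d + 1) * N - d * (d + 1) * t := by
  have hd : 1 ≤ d := by nlinarith
  have hd' : 1 ≤ d' := by nlinarith
  have hdd' : d' ≤ d := by nlinarith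
  have he : 0 ≤ t * ((d - d') * (d - d' - 1)) := by
    rcases (by omega : d - d' = 0 ∨ 1 ≤ d - d') with h | h
    · rw [h]; simp
    · exact mul_nonneg (by omega) (mul_nonneg (by omega) (by omega))
  nlinarith [mul_nonneg (sub_nonneg.mpr hdd') (by nlinarith : (0:Int) ≤ N - d * t),
    mul_nonneg (mul_nonneg (by omega : (0:Int) ≤ d') (by omega : (0:Int) ≤ d' + 1))
      (sub_nonneg.mpr htt'), he]

theorem pvP_mono (N M t t' : Int) (ht : 1 ≤ t) (htt' : t ≤ t') (htN : t' ≤ N)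
    (h : pvP N M t) : pvP N M t' := by
  rw [pvP_iff N M t (by omega)] at h
  rw [pvP_iff N M t' (by omega)]
  have h1 := PySem.Int.floordiv_mul_add_mod N t
  have hr0 := PySem.Int.mod_nonneg N (by omega : (0:Int) < t)
  have hr1 := PySem.Int.mod_lt N (by omega : (0:Int) < t)
  have h2 := PySem.Int.floordiv_mul_add_mod N t'
  have hr0' := PySem.Int.mod_nonneg N (by omega : (0:Int) < t')
  have hr1' := PySem.Int.mod_lt N (by omega : (0:Int) < t')
  have := pv_sumsq_mono N t t' (PySem.Int.floordiv N t) (PySem.Int.mod N t)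
    (PySem.Int.floordiv N t') (PySem.Int.mod N t') ht htt' htN h1 hr0 hr1 h2 hr0' hr1'
  linarith

theorem pv_fdiv_block (N k j : Int) (hk : 1 ≤ k) (hkN : k ≤ N) (hkj : k ≤ j)
    (hj : PySem.Int.floordiv N k * j ≤ N) :
    PySem.Int.floordiv N j = PySem.Int.floordiv N k := by
  have h1 := PySem.Int.floordiv_mul_add_mod N k
  have hr0 := PySem.Int.mod_nonneg N (by omega : (0:Int) < k)
  have hr1 := PySem.Int.mod_lt N (by omega : (0:Int) < k)
  have h2 := PySem.Int.floordiv_mul_add_mod N j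
  have hr0' := PySem.Int.mod_nonneg N (by omega : (0:Int) < j)
  have hr1' := PySem.Int.mod_lt N (by omega : (0:Int) < j)
  have hd : 1 ≤ PySem.Int.floordiv N k := pv_fdiv_pos N k (by omega) hkN
  have hup : PySem.Int.floordiv N j ≤ PySem.Int.floordiv N k := by
    by_contra hc
    rw [not_le] at hc
    have e1 : (PySem.Int.floordiv N k + 1) * j ≤ PySem.Int.floordiv N j * j :=
      mul_le_mul_of_nonneg_right (by omega) (by omega)
    have e2 : (PySem.Int.floordiv N k + 1) * k ≤ (PySem.Int.floordiv N k + 1) * j :=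
      mul_le_mul_of_nonneg_left hkj (by omega)
    nlinarith
  have hlo : PySem.Int.floordiv N k ≤ PySem.Int.floordiv N j := by
    by_contra hc
    rw [not_le] at hc
    have e1 : (PySem.Int.floordiv N j + 1) * j ≤ PySem.Int.floordiv N k * j :=
      mul_le_mul_of_nonneg_right (by omega) (by omega)
    nlinarith
  omega

theorem pv_ceil_spec (c m : Int) (hm : 0 < m) :
    c ≤ m * (-(PySem.Int.floordiv (-c) m)) ∧ m * (-(PySem.Int.floordiv (-c) m) - 1) < c := by
  have h1 := PySem.Int.floordiv_mul_add_mod (-c) m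
  have hr0 := PySem.Int.mod_nonneg (-c) hm
  have hr1 := PySem.Int.mod_lt (-c) hm
  constructor <;> nlinarith


-- unfolding equations with the local lets inlined (proved by the definitional equation)
theorem loopA_unfold (N M low high : Int) :
    minCliqueLoopA N M low high =
      if low + 1 < high then
        if PySem.Int.floordiv
            (N * N
              - (PySem.Int.floordiv N (PySem.Int.floordiv (low + high) 2) + 1)
                * (PySem.Int.floordiv N (PySem.Int.floordiv (low + high) 2) + 1)
                * PySem.Int.mod N (PySem.Int.floordiv (low + high) 2)
              - PySem.Int.floordiv N (PySem.Int.floordiv (low + high) 2)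
                * PySem.Int.floordiv N (PySem.Int.floordiv (low + high) 2)
                * (PySem.Int.floordiv (low + high) 2
                    - PySem.Int.mod N (PySem.Int.floordiv (low + high) 2))) 2 < M
        then minCliqueLoopA N M (PySem.Int.floordiv (low + high) 2) high
        else minCliqueLoopA N M low (PySem.Int.floordiv (low + high) 2)
      else high := by
  rw [minCliqueLoopA]

theorem loopB_unfold (N M k : Int) (hk : 2 ≤ k) (hN : 2 < N) :
    minCliqueLoopB N M k hk hN =
      if h : k < N then
        if PySem.Int.floordiv N k * (PySem.Int.floordiv N k + 1)
              * min (PySem.Int.floordiv N (PySem.Int.floordiv N k)) (N - 1)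
            ≥ (2 * PySem.Int.floordiv N k + 1) * N - N * N + 2 * M
        then max k (-(PySem.Int.floordiv
              (-((2 * PySem.Int.floordiv N k + 1) * N - N * N + 2 * M))
              (PySem.Int.floordiv N k * (PySem.Int.floordiv N k + 1))))
        else minCliqueLoopB N M
          (min (PySem.Int.floordiv N (PySem.Int.floordiv N k)) (N - 1) + 1)
          (pv_stepB_ge N k hk h) hN
      else N := by
  rw [minCliqueLoopB]

theorem loopA_correct (N M : Int) (_hN : 2 < N) :
    ∀ n low high, (high - low).toNat = n → 1 ≤ low → low < high → high ≤ N →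
      (∀ t, 2 ≤ t → t ≤ low → ¬ pvP N M t) → (high < N → pvP N M high) →
      pvIsAns N M (minCliqueLoopA N M low high) := by
  intro n
  induction n using Nat.strong_induction_on with
  | _ n ih =>
    intro low high hn h1 h2 h3 hlow hhigh
    rw [loopA_unfold]
    by_cases hc : low + 1 < high
    · rw [if_pos hc]
      set mid := PySem.Int.floordiv (low + high) 2 with hmid
      have hb := PySem.Int.floordiv_mul_add_mod (low + high) 2
      have hb0 := PySem.Int.mod_nonneg (low + high) (by omega : (0:Int) < 2)
      have hb1 := PySem.Int.mod_lt (low + high) (by omega : (0:Int) < 2)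
      rw [← hmid] at hb
      have hmlo : low < mid := by omega
      have hmhi : mid < high := by omega
      split_ifs with hP
      · -- m_max < M : pvP fails at mid, move low up
        have hPmid : ¬ pvP N M mid := by unfold pvP; exact not_le.mpr hP
        exact ih (high - mid).toNat (by omega) mid high rfl (by omega) (by omega) h3
          (fun t ht2 htm => by
            rcases le_or_gt t low with h | h
            · exact hlow t ht2 h
            · exact fun hPt => hPmid (pvP_mono N M t mid (by omega) htm (by omega) hPt))
          hhigh
      · -- pvP holds at mid, move high down
        have hPmid : pvP N M mid := by unfold pvP; exact not_lt.mp hP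
        exact ih (mid - low).toNat (by omega) low mid rfl h1 hmlo (by omega) hlow
          (fun _ => hPmid)
    · rw [if_neg hc]
      exact ⟨by omega, h3, hhigh, fun t ht1 ht2 => hlow t ht1 (by omega)⟩

theorem loopB_correct (N M : Int) :
    ∀ n k (hk : 2 ≤ k) (hN : 2 < N), (N - k).toNat = n →
      (∀ t, 2 ≤ t → t < k → ¬ pvP N M t) →
      pvIsAns N M (minCliqueLoopB N M k hk hN) := by
  intro n
  induction n using Nat.strong_induction_on with
  | _ n ih =>
    intro k hk hN hn hinv
    rw [loopB_unfold]
    by_cases hkN : k < N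
    · rw [dif_pos hkN]
      set d := PySem.Int.floordiv N k with hd
      set k2 := min (PySem.Int.floordiv N d) (N - 1) with hk2
      set c := (2 * d + 1) * N - N * N + 2 * M with hc
      have hd1 : 1 ≤ d := pv_fdiv_pos N k (by omega) (by omega)
      have hdk := PySem.Int.floordiv_mul_add_mod N k
      have hr0 := PySem.Int.mod_nonneg N (by omega : (0:Int) < k)
      rw [← hd] at hdk
      have hdd := PySem.Int.floordiv_mul_add_mod N d
      have hs0 := PySem.Int.mod_nonneg N (by omega : (0:Int) < d)
      have hk2lo : k ≤ k2 :=
        le_min (pv_le_fdiv_of_mul_le N d k hd1 (by nlinarith)) (by omega)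
      have hk2hi : k2 ≤ N - 1 := min_le_right _ _
      have hblock : ∀ j, k ≤ j → j ≤ k2 → PySem.Int.floordiv N j = d := by
        intro j hj1 hj2
        apply pv_fdiv_block N k j (by omega) (by omega) hj1
        have hjd : j ≤ PySem.Int.floordiv N d := le_trans hj2 (min_le_left _ _)
        rw [← hd]
        nlinarith [mul_le_mul_of_nonneg_left hjd (by omega : (0:Int) ≤ d)]
      have hPiff : ∀ j, k ≤ j → j ≤ k2 → (pvP N M j ↔ c ≤ d * (d + 1) * j) := by
        intro j hj1 hj2
        rw [pvP_iff N M j (by omega), hblock j hj1 hj2, hc]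
      have hm : (0:Int) < d * (d + 1) := by positivity
      split_ifs with hhit
      · -- this block contains the answer: close it with one ceiling division
        set ceilv := -PySem.Int.floordiv (-c) (d * (d + 1)) with hceil
        obtain ⟨hcl, hcu⟩ := pv_ceil_spec c (d * (d + 1)) hm
        rw [← hceil] at hcl hcu
        have hceil_le : ceilv ≤ k2 := by
          by_contra hcon
          rw [not_le] at hcon
          nlinarith [mul_le_mul_of_nonneg_left (by omega : k2 ≤ ceilv - 1)
            (by omega : (0:Int) ≤ d * (d + 1))]
        have ha2 : 2 ≤ max k ceilv := le_trans hk (le_max_left _ _)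
        have hak : k ≤ max k ceilv := le_max_left _ _
        have hak2 : max k ceilv ≤ k2 := max_le hk2lo hceil_le
        refine ⟨ha2, by omega, fun _ => ?_, fun t ht1 ht2 => ?_⟩
        · rw [hPiff _ hak hak2]
          calc c ≤ d * (d + 1) * ceilv := hcl
            _ ≤ d * (d + 1) * max k ceilv :=
              mul_le_mul_of_nonneg_left (le_max_right _ _) (by omega)
        · rcases lt_or_ge t k with h | h
          · exact hinv t ht1 h
          · have htc : t < ceilv := by
              rcases max_choice k ceilv with hmx | hmx <;> omega
            rw [hPiff t h (by omega), not_le]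
            calc d * (d + 1) * t ≤ d * (d + 1) * (ceilv - 1) :=
                  mul_le_mul_of_nonneg_left (by omega) (by omega)
              _ < c := hcu
      · -- whole block fails: skip to k2 + 1
        rw [not_le] at hhit
        exact ih (N - (k2 + 1)).toNat (by omega) (k2 + 1) (by omega) hN rfl
          (fun t ht1 ht2 => by
            rcases lt_or_ge t k with h | h
            · exact hinv t ht1 h
            · rw [hPiff t h (by omega), not_le]
              calc d * (d + 1) * t ≤ d * (d + 1) * k2 :=
                    mul_le_mul_of_nonneg_left (by omega) (by omega)
                _ < c := hhit)
    · rw [dif_neg hkN]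
      exact ⟨by omega, by omega, by omega, fun t ht1 ht2 => hinv t ht1 (by omega)⟩

-- ===== VERDICT (by name: the statement is the Claim_ definition above) =====
theorem min_clique_spec : Claim_equal_min_clique := by
  intro N M _
  unfold Spec_min_clique min_clique min_clique_alt
  by_cases hN : N ≤ 2
  · rw [minCliqueLoopA]
    simp [hN]
  · rw [dif_neg hN]
    exact pvIsAns_unique N M _ _
      (loopA_correct N M (by omega) (N - 1).toNat 1 N rfl (by omega) (by omega) (by omega)
        (by omega) (by omega))
      (loopB_correct N M (N - 2).toNat 2 (by omega) (by omega) rfl (by omega))
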